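-- pv_equiv track=rewrite | github.com/user17-02/Puzzle | main.py | detect_theme
-- ===== SOURCE A (Python) =====
-- THEME_WORDS = {
--     "animals": ["TIGER", "LION", "HORSE", "SNAKE", "EAGLE", "WHALE", "ZEBRA"],
--     "nature": ["RIVER", "STONE", "CLOUD", "FOREST", "OCEAN", "PLANT"],
--     "kids": ["APPLE", "BALL", "TRAIN", "HOUSE", "SMILE", "CANDY"],
--     "general": []
-- }
--
-- def detect_theme(words):
--     scores = {}
--
--     for theme, keywords in THEME_WORDS.items():
--         if not keywords:
--             continue
--         scores[theme] = sum(1 for w in words if w in keywords)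
--
--     if not scores:
--         return "general"
--
--     best_theme = max(scores, key=scores.get)
--     return best_theme if scores[best_theme] > 0 else "general"
-- ===== SOURCE B (Python) =====
-- THEME_WORDS = {
--     "animals": ["TIGER", "LION", "HORSE", "SNAKE", "EAGLE", "WHALE", "ZEBRA"],
--     "nature": ["RIVER", "STONE", "CLOUD", "FOREST", "OCEAN", "PLANT"],
--     "kids": ["APPLE", "BALL", "TRAIN", "HOUSE", "SMILE", "CANDY"],
--     "general": []
-- }
--
-- # keyword -> theme index, built once (keyword lists are disjoint)
-- KEYWORD_TO_THEME = {kw: theme for theme, kws in THEME_WORDS.items() for kw in kws}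
--
--
-- def detect_theme(words):
--     scores = {theme: 0 for theme, kws in THEME_WORDS.items() if kws}
--     for w in words:
--         theme = KEYWORD_TO_THEME.get(w)
--         if theme is not None:
--             scores[theme] += 1
--     best = max(scores, key=scores.get)
--     return best if scores[best] > 0 else "general"
-- ===== Notes on version B (the rewrite author's own statement) =====
-- stated objective: alternative
-- what changed: Replaces the nested theme-by-theme scan over words with a single pass over words using a precomputed keyword-to-theme dict and pre-seeded score counters (seeded in theme order so max's tie-break is unchanged).
import Mathlib
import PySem

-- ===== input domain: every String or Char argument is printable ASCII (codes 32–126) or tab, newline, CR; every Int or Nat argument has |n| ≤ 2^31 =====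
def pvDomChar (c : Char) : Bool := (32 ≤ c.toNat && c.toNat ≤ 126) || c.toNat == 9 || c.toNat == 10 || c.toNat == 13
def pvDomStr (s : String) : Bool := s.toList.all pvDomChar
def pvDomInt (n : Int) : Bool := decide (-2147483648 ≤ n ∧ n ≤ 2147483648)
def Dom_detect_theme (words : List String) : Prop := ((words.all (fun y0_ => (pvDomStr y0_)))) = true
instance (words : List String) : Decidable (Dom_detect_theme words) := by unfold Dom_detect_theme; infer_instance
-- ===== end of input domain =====

-- B replaces A's nested theme-by-theme membership scans over words by a single pass over words
-- with a precomputed keyword→theme dict and pre-seeded per-theme counters (alternative decomposition).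

-- module constant THEME_WORDS (a dict: association list in insertion order)
def THEME_WORDS : List (String × List String) :=
  [("animals", ["TIGER", "LION", "HORSE", "SNAKE", "EAGLE", "WHALE", "ZEBRA"]),
   ("nature",  ["RIVER", "STONE", "CLOUD", "FOREST", "OCEAN", "PLANT"]),
   ("kids",    ["APPLE", "BALL", "TRAIN", "HOUSE", "SMILE", "CANDY"]),
   ("general", [])]

-- ===== PORT A =====
-- for theme, keywords in THEME_WORDS.items(): skip empty; scores[theme] = sum(1 for w in words if w in keywords)
-- then max(scores, key=scores.get) (first maximal key), guarded by the empty-dict check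
def detect_theme (words : List String) : String :=
  let scores : PySem.Dict String Int :=
    THEME_WORDS.foldl
      (fun d p =>
        if p.2 = [] then d
        else d.insert p.1 ((words.filter (fun w => p.2.contains w)).length : Int))
      PySem.Dict.empty
  if scores.items = [] then "general"
  else
    match PySem.List.max? scores.keys (fun t => scores.getD t 0) with
    | none => "general"   -- unreachable: scores has keys here (Python max on empty would raise)
    | some best => if scores.getD best 0 > 0 then best else "general"

-- ===== PORT B =====
-- KEYWORD_TO_THEME = {kw: theme for theme, kws in THEME_WORDS.items() for kw in kws}
def KEYWORD_TO_THEME : PySem.Dict String String :=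
  THEME_WORDS.foldl (fun d p => p.2.foldl (fun d' kw => d'.insert kw p.1) d) PySem.Dict.empty

-- scores = {theme: 0 for theme, kws in THEME_WORDS.items() if kws}; one pass over words
-- incrementing scores[KEYWORD_TO_THEME[w]] when w is a known keyword; then the same argmax
def detect_theme_alt (words : List String) : String :=
  let scores0 : PySem.Dict String Int :=
    THEME_WORDS.foldl (fun d p => if p.2 = [] then d else d.insert p.1 0) PySem.Dict.empty
  let scores :=
    words.foldl
      (fun d w =>
        match KEYWORD_TO_THEME.get? w with
        | some t => d.modify t 0 (· + 1)
        | none => d)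
      scores0
  match PySem.List.max? scores.keys (fun t => scores.getD t 0) with
  | none => "general"   -- unreachable: scores always has three keys (Python max on empty would raise)
  | some best => if scores.getD best 0 > 0 then best else "general"

-- ===== PRECONDITION & SPEC =====
def Spec_detect_theme (words : List String) (out : String) : Prop := out = detect_theme_alt words
instance (words : List String) (out : String) : Decidable (Spec_detect_theme words out) := by unfold Spec_detect_theme; infer_instance

-- ===== CLAIM (what is proved, stated in full; the proofs are below) =====
def Claim_equal_detect_theme : Prop := ∀ (words : List String), Dom_detect_theme words → Spec_detect_theme words (detect_theme words)

-- ===== LEMMAS AND PROOFS =====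

def animalsL : List String := ["TIGER", "LION", "HORSE", "SNAKE", "EAGLE", "WHALE", "ZEBRA"]
def natureL  : List String := ["RIVER", "STONE", "CLOUD", "FOREST", "OCEAN", "PLANT"]
def kidsL    : List String := ["APPLE", "BALL", "TRAIN", "HOUSE", "SMILE", "CANDY"]

theorem get?_mk_map_const (kws : List String) (t w : String) (rest : List (String × String)) :
    (PySem.Dict.mk (kws.map (fun kw => (kw, t)) ++ rest)).get? w =
      if kws.contains w then some t else (PySem.Dict.mk rest).get? w := by
  induction kws with
  | nil => simp
  | cons k ks ih =>
    by_cases h : k = w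
    · simp [PySem.Dict.get?_mk_cons, h]
    · simp [PySem.Dict.get?_mk_cons, ih, Ne.symm h, h]

set_option maxHeartbeats 4000000 in
theorem kw_eval : KEYWORD_TO_THEME = PySem.Dict.mk
    (animalsL.map (fun kw => (kw, "animals")) ++
     (natureL.map (fun kw => (kw, "nature")) ++
      (kidsL.map (fun kw => (kw, "kids")) ++ []))) := by rfl

theorem kw_lookup (w : String) :
    KEYWORD_TO_THEME.get? w =
      (if animalsL.contains w then some "animals"
       else if natureL.contains w then some "nature"
       else if kidsL.contains w then some "kids"
       else none) := by
  rw [kw_eval, get?_mk_map_const, get?_mk_map_const, get?_mk_map_const]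
  simp [PySem.Dict.get?]

theorem disjAN : ∀ w ∈ animalsL, w ∉ natureL := by decide
theorem disjAK : ∀ w ∈ animalsL, w ∉ kidsL := by decide
theorem disjNK : ∀ w ∈ natureL, w ∉ kidsL := by decide

theorem modA (a n k : Int) :
    (PySem.Dict.mk [("animals", a), ("nature", n), ("kids", k)]).modify "animals" 0 (· + 1)
      = PySem.Dict.mk [("animals", a + 1), ("nature", n), ("kids", k)] := by
  simp [PySem.Dict.modify, PySem.Dict.insert, PySem.Dict.contains, PySem.Dict.getD, PySem.Dict.get?]

theorem modN (a n k : Int) :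
    (PySem.Dict.mk [("animals", a), ("nature", n), ("kids", k)]).modify "nature" 0 (· + 1)
      = PySem.Dict.mk [("animals", a), ("nature", n + 1), ("kids", k)] := by
  simp [PySem.Dict.modify, PySem.Dict.insert, PySem.Dict.contains, PySem.Dict.getD, PySem.Dict.get?]

theorem modK (a n k : Int) :
    (PySem.Dict.mk [("animals", a), ("nature", n), ("kids", k)]).modify "kids" 0 (· + 1)
      = PySem.Dict.mk [("animals", a), ("nature", n), ("kids", k + 1)] := by
  simp [PySem.Dict.modify, PySem.Dict.insert, PySem.Dict.contains, PySem.Dict.getD, PySem.Dict.get?]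

theorem step_some (d : PySem.Dict String Int) (t : String) :
    (match some t with
     | some t => d.modify t 0 (· + 1)
     | none => d) = d.modify t 0 (· + 1) := rfl

theorem step_none (d : PySem.Dict String Int) :
    (match (none : Option String) with
     | some t => d.modify t 0 (· + 1)
     | none => d) = d := rfl

theorem foldB (ws : List String) (a n k : Int) :
    ws.foldl
      (fun d w =>
        match KEYWORD_TO_THEME.get? w with
        | some t => d.modify t 0 (· + 1)
        | none => d)
      (PySem.Dict.mk [("animals", a), ("nature", n), ("kids", k)]) =
    PySem.Dict.mk
      [("animals", a + ((ws.filter (fun w => animalsL.contains w)).length : Int)),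
       ("nature",  n + ((ws.filter (fun w => natureL.contains w)).length : Int)),
       ("kids",    k + ((ws.filter (fun w => kidsL.contains w)).length : Int))] := by
  induction ws generalizing a n k with
  | nil => simp
  | cons w ws ih =>
    rw [List.foldl_cons, kw_lookup]
    by_cases hA : w ∈ animalsL
    · have hN := disjAN w hA
      have hK := disjAK w hA
      rw [if_pos (show animalsL.contains w = true by simp [hA])]
      rw [step_some, modA]
      rw [ih]
      simp [hA, hN, hK]
      omega
    · rw [if_neg (show ¬ animalsL.contains w = true by simp [hA])]
      by_cases hN : w ∈ natureL
      · have hK := disjNK w hN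
        rw [if_pos (show natureL.contains w = true by simp [hN])]
        rw [step_some, modN]
        rw [ih]
        simp [hA, hN, hK]
        omega
      · rw [if_neg (show ¬ natureL.contains w = true by simp [hN])]
        by_cases hK : w ∈ kidsL
        · rw [if_pos (show kidsL.contains w = true by simp [hK])]
          rw [step_some, modK]
          rw [ih]
          simp [hA, hN, hK]
          omega
        · rw [if_neg (show ¬ kidsL.contains w = true by simp [hK])]
          rw [step_none, ih]
          simp [hA, hN, hK]

set_option maxHeartbeats 2000000 in
theorem main_eq (ws : List String) : detect_theme ws = detect_theme_alt ws := by
  simp only [detect_theme, detect_theme_alt]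
  rw [show (THEME_WORDS.foldl (fun (d : PySem.Dict String Int) p => if p.2 = [] then d else d.insert p.1 0) PySem.Dict.empty) = PySem.Dict.mk [("animals", (0:Int)), ("nature", 0), ("kids", 0)] from rfl]
  rw [foldB]
  rw [show (THEME_WORDS.foldl (fun (d : PySem.Dict String Int) p => if p.2 = [] then d else d.insert p.1 ((ws.filter (fun w => p.2.contains w)).length : Int)) PySem.Dict.empty) = PySem.Dict.mk [("animals", ((ws.filter (fun w => animalsL.contains w)).length : Int)), ("nature", ((ws.filter (fun w => natureL.contains w)).length : Int)), ("kids", ((ws.filter (fun w => kidsL.contains w)).length : Int))] from rfl]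
  simp

-- ===== VERDICT (by name: the statement is the Claim_ definition above) =====
theorem detect_theme_spec : Claim_equal_detect_theme := by
  intro ws _
  unfold Spec_detect_theme
  exact main_eq ws
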